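-- pv_equiv track=rewrite | github.com/binayakbishnu/Python_Basics | Miscellaneous-Py/longestcombo.py | longestcombo
-- ===== SOURCE A (Python) =====
-- def longestcombo(a1,a2):
--   x=[]
--   for i in a1:
--       for j in a2:
--         if i not in x:
--             x.append(i)
--         if j not in x:
--             x.append(j)
--
--   x.sort()
--   return ("".join(x))
-- ===== SOURCE B (Python) =====
-- def longestcombo(a1, a2):
--     combined = sorted(list(a1) + list(a2))
--     out = []
--     for c in combined:
--         if not out or c != out[-1]:
--             out.append(c)
--     return "".join(out)
-- ===== Notes on version B (the rewrite author's own statement) =====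
-- stated objective: faster
-- what changed: A builds the union with a quadratic nested loop over both lists using repeated 'not in' list scans and then sorts; B sorts the concatenation once and removes duplicates in a single adjacent-comparison pass.
-- intended difference: When exactly one argument list is empty and the other contains a nonempty string, A's nested loop never runs and it returns '' ignoring the nonempty list, while B returns the sorted joined unique strings of that list, the intended union. — e.g. on longestcombo(["a"], []): A returns "", B returns "a"
import Mathlib
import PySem

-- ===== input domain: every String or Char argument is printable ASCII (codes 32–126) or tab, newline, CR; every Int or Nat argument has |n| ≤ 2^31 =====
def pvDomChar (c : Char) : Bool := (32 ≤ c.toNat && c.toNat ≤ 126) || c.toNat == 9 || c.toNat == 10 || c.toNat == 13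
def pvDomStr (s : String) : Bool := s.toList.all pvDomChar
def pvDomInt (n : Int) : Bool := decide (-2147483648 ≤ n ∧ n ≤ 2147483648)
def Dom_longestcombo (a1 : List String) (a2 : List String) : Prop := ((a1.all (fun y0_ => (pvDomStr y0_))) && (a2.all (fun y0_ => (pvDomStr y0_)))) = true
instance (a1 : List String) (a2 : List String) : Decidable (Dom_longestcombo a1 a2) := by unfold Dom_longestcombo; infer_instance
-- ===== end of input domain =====

-- B replaces A's quadratic nested membership-building loop by sort-then-adjacent-dedup; on inputs where
-- one list is empty and the other holds a nonempty string, A returns "" and B returns the intended union (see D_).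


-- ===== PORT A =====
-- the body of A's inner loop: append i if absent, then append j if absent
def longestcomboStepA (x : List String) (i : String) (j : String) : List String :=
  let x1 := if x.contains i then x else x ++ [i]
  if x1.contains j then x1 else x1 ++ [j]

def longestcombo (a1 : List String) (a2 : List String) : String :=
  let x := a1.foldl (fun x i => a2.foldl (fun x j => longestcomboStepA x i j) x) []
  PySem.Str.join "" (PySem.List.sorted x (fun s => s) false)

-- ===== PORT B =====
def longestcombo_alt (a1 : List String) (a2 : List String) : String :=
  let combined := PySem.List.sorted (a1 ++ a2) (fun s => s) false
  let out := combined.foldl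
    (fun out c => if out = [] ∨ c ≠ PySem.List.pyGetD out (-1) "" then out ++ [c] else out) []
  PySem.Str.join "" out

-- ===== PRECONDITION & SPEC =====
-- When exactly one side is effectively empty (one argument list is [] and the other contains a nonempty
-- string), A's nested loop never appends anything and A returns "" ignoring the nonempty list; B returns
-- the sorted joined unique strings of that list, the intended union.
def D_longestcombo (a1 : List String) (a2 : List String) : Prop :=
  (a1 = [] ∨ a2 = []) ∧ ∃ s ∈ a1 ++ a2, s ≠ ""
instance (a1 : List String) (a2 : List String) : Decidable (D_longestcombo a1 a2) := by
  unfold D_longestcombo; infer_instance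

def Spec_longestcombo (a1 : List String) (a2 : List String) (out : String) : Prop :=
  ¬ D_longestcombo a1 a2 → out = longestcombo_alt a1 a2
instance (a1 : List String) (a2 : List String) (out : String) : Decidable (Spec_longestcombo a1 a2 out) := by
  unfold Spec_longestcombo; infer_instance

def pvDiffWitness_longestcombo : List String × List String := (["a"], [])
def pvDiffWitnessOut_longestcombo : String × String := ("", "a")

-- ===== CLAIM (what is proved, stated in full; the proofs are below) =====
def Claim_unchanged_longestcombo : Prop := ∀ (a1 : List String) (a2 : List String), Dom_longestcombo a1 a2 → Spec_longestcombo a1 a2 (longestcombo a1 a2)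
def Claim_changed_longestcombo : Prop := Dom_longestcombo (pvDiffWitness_longestcombo.1) (pvDiffWitness_longestcombo.2) ∧ D_longestcombo (pvDiffWitness_longestcombo.1) (pvDiffWitness_longestcombo.2) ∧ longestcombo (pvDiffWitness_longestcombo.1) (pvDiffWitness_longestcombo.2) = pvDiffWitnessOut_longestcombo.1 ∧ longestcombo_alt (pvDiffWitness_longestcombo.1) (pvDiffWitness_longestcombo.2) = pvDiffWitnessOut_longestcombo.2 ∧ pvDiffWitnessOut_longestcombo.1 ≠ pvDiffWitnessOut_longestcombo.2
def Claim_exact_longestcombo : Prop := ∀ (a1 : List String) (a2 : List String), Dom_longestcombo a1 a2 → D_longestcombo a1 a2 → longestcombo a1 a2 ≠ longestcombo_alt a1 a2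

-- ===== LEMMAS AND PROOFS =====

-- join "" of a list of strings is ofList of the concatenation of their characters
theorem join_empty_eq (l : List String) :
    PySem.Str.join "" l = String.ofList ((l.map String.toList).flatten) := by
  have h : ∀ m : List (List Char), PySem.Chars.join [] m = m.flatten := by
    intro m
    induction m with
    | nil => rfl
    | cons a t ih =>
      cases t with
      | nil => simp [PySem.Chars.join, List.intercalate]
      | cons b r => rw [PySem.Chars.join_cons_cons]; simp [ih]
  simp [PySem.Str.join, h]

theorem join_all_empty (l : List String) (h : ∀ s ∈ l, s = "") :
    PySem.Str.join "" l = "" := by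
  rw [join_empty_eq]
  have : (l.map String.toList).flatten = [] := by
    simp only [List.flatten_eq_nil_iff]
    intro xs hxs
    simp only [List.mem_map] at hxs
    obtain ⟨s, hs, rfl⟩ := hxs
    rw [h s hs]; rfl
  rw [this]

theorem join_ne_empty (l : List String) (s : String) (hs : s ∈ l) (hne : s ≠ "") :
    PySem.Str.join "" l ≠ "" := by
  rw [join_empty_eq]
  intro h
  have h2 : (l.map String.toList).flatten = [] := by
    have := congrArg String.toList h
    rwa [String.toList_ofList] at this
  rw [List.flatten_eq_nil_iff] at h2
  have h3 : s.toList = [] := h2 s.toList (List.mem_map_of_mem hs)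
  exact hne (by have := congrArg String.ofList h3; rwa [String.ofList_toList] at this)

-- membership in A's inner loop result (nonempty a2)
theorem innerA_mem (a2 : List String) (x : List String) (i : String) (h2 : a2 ≠ []) (s : String) :
    s ∈ a2.foldl (fun x j => longestcomboStepA x i j) x ↔ s ∈ x ∨ s = i ∨ s ∈ a2 := by
  induction a2 generalizing x with
  | nil => exact absurd rfl h2
  | cons j rest ih =>
    simp only [List.foldl_cons]
    have hstep : ∀ t, t ∈ longestcomboStepA x i j ↔ t ∈ x ∨ t = i ∨ t = j := by
      intro t
      simp only [longestcomboStepA]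
      split_ifs with h1' h2' h2' <;>
        simp only [List.contains_iff_mem, List.mem_append, List.mem_singleton] at * <;>
        constructor <;> (rintro (h | h | h) <;> simp_all) <;> tauto
    cases rest with
    | nil =>
      simp only [List.foldl_nil, hstep s, List.mem_cons, List.not_mem_nil]
      tauto
    | cons b r =>
      rw [ih _ (by simp)]
      simp only [hstep s, List.mem_cons]
      tauto

-- A's step preserves Nodup
theorem stepA_nodup (x : List String) (i j : String) (h : x.Nodup) :
    (longestcomboStepA x i j).Nodup := by
  simp only [longestcomboStepA]
  split_ifs with h1 h2 h2 <;>
    simp_all [List.nodup_append] <;>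
    aesop

theorem innerA_nodup (a2 : List String) (x : List String) (i : String) (h : x.Nodup) :
    (a2.foldl (fun x j => longestcomboStepA x i j) x).Nodup := by
  induction a2 generalizing x with
  | nil => exact h
  | cons j rest ih => exact ih _ (stepA_nodup x i j h)

-- membership in A's full accumulator (both lists nonempty)
theorem outerA_mem (a1 : List String) (a2 : List String) (x : List String)
    (h1 : a1 ≠ []) (h2 : a2 ≠ []) (s : String) :
    s ∈ a1.foldl (fun x i => a2.foldl (fun x j => longestcomboStepA x i j) x) x ↔
      s ∈ x ∨ s ∈ a1 ∨ s ∈ a2 := by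
  induction a1 generalizing x with
  | nil => exact absurd rfl h1
  | cons i rest ih =>
    simp only [List.foldl_cons]
    cases rest with
    | nil =>
      simp only [List.foldl_nil, innerA_mem a2 x i h2 s, List.mem_cons, List.not_mem_nil]
      tauto
    | cons b r =>
      rw [ih _ (by simp)]
      simp only [innerA_mem a2 x i h2 s, List.mem_cons]
      tauto

theorem outerA_nodup (a1 : List String) (a2 : List String) (x : List String) (h : x.Nodup) :
    (a1.foldl (fun x i => a2.foldl (fun x j => longestcomboStepA x i j) x) x).Nodup := by
  induction a1 generalizing x with
  | nil => exact h
  | cons i rest ih => exact ih _ (innerA_nodup a2 x i h)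

-- in a strictly increasing list every element is ≤ the last
theorem le_getLast_of_pairwise_lt (l : List String) (hp : l.Pairwise (· < ·))
    (a : String) (ha : a ∈ l) (h : l ≠ []) : a ≤ l.getLast h := by
  induction l with
  | nil => exact absurd rfl h
  | cons b t ih =>
    rcases List.mem_cons.mp ha with rfl | ha'
    · cases t with
      | nil => simp [List.getLast]
      | cons c r =>
        have hb : a < (c :: r).getLast (by simp) := by
          exact (List.pairwise_cons.mp hp).1 _ (List.getLast_mem _)
        rw [List.getLast_cons (by simp)]
        exact le_of_lt hb
    · have ht : t ≠ [] := by rintro rfl; exact absurd ha' (List.not_mem_nil)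
      rw [List.getLast_cons ht]
      exact ih (List.pairwise_cons.mp hp).2 ha' ht

-- B's adjacent-dedup scan: invariant over the fold
theorem dedupB_spec (ys : List String) : ∀ (out : List String),
    ys.Pairwise (· ≤ ·) → out.Pairwise (· < ·) → (∀ a ∈ out, ∀ b ∈ ys, a ≤ b) →
    (ys.foldl (fun out c => if out = [] ∨ c ≠ PySem.List.pyGetD out (-1) "" then out ++ [c] else out) out).Pairwise (· < ·) ∧
    (∀ s, s ∈ ys.foldl (fun out c => if out = [] ∨ c ≠ PySem.List.pyGetD out (-1) "" then out ++ [c] else out) out ↔ s ∈ out ∨ s ∈ ys) := by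
  induction ys with
  | nil => intro out _ hp _; exact ⟨hp, by simp⟩
  | cons c rest ih =>
    intro out hys hp hle
    simp only [List.foldl_cons]
    by_cases hout : out = []
    · subst hout
      rw [if_pos (Or.inl rfl)]
      have e : ([] : List String) ++ [c] = [c] := rfl
      rw [e]
      have hys' := (List.pairwise_cons.mp hys).2
      have hcle := (List.pairwise_cons.mp hys).1
      obtain ⟨hpw, hmem⟩ := ih [c] hys' (by simp) (by
        intro a ha b hb
        simp only [List.mem_singleton] at ha; subst ha
        exact hcle b hb)
      refine ⟨hpw, fun s => ?_⟩
      rw [hmem s]; simp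
    · rw [PySem.List.pyGetD_neg_one out "" hout]
      have hys' := (List.pairwise_cons.mp hys).2
      have hcle := (List.pairwise_cons.mp hys).1
      by_cases hc : c = out.getLast hout
      · rw [if_neg (by simp [hout, hc])]
        obtain ⟨hpw, hmem⟩ := ih out hys' hp (by
          intro a ha b hb; exact hle a ha b (List.mem_cons_of_mem _ hb))
        refine ⟨hpw, fun s => ?_⟩
        rw [hmem s]
        constructor
        · rintro (h | h)
          · exact Or.inl h
          · exact Or.inr (List.mem_cons_of_mem _ h)
        · rintro (h | h)
          · exact Or.inl h
          · rcases List.mem_cons.mp h with rfl | h'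
            · exact Or.inl (by rw [hc]; exact List.getLast_mem hout)
            · exact Or.inr h'
      · rw [if_pos (Or.inr hc)]
        have hlt : ∀ a ∈ out, a < c := by
          intro a ha
          have h1 : a ≤ c := hle a ha c (List.mem_cons_self)
          rcases lt_or_eq_of_le h1 with h | h
          · exact h
          · exfalso
            subst h
            have h2 : a ≤ out.getLast hout := le_getLast_of_pairwise_lt out hp a ha hout
            have h3 : out.getLast hout ≤ a := hle _ (List.getLast_mem hout) a (List.mem_cons_self)
            exact hc (le_antisymm h3 h2).symm
        have hp' : (out ++ [c]).Pairwise (· < ·) := by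
          rw [List.pairwise_append]
          exact ⟨hp, by simp, by intro a ha b hb; simp at hb; subst hb; exact hlt a ha⟩
        obtain ⟨hpw, hmem⟩ := ih (out ++ [c]) hys' hp' (by
          intro a ha b hb
          rcases List.mem_append.mp ha with h | h
          · exact hle a h b (List.mem_cons_of_mem _ hb)
          · simp at h; subst h; exact hcle b hb)
        refine ⟨hpw, fun s => ?_⟩
        rw [hmem s]
        simp only [List.mem_append, List.mem_cons]
        tauto

-- A's result list is empty when either argument is empty
theorem xA_nil_of_empty (a1 a2 : List String) (h : a1 = [] ∨ a2 = []) :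
    a1.foldl (fun x i => a2.foldl (fun x j => longestcomboStepA x i j) x) [] = [] := by
  rcases h with rfl | rfl
  · rfl
  · simp

-- the central list identity: both nonempty ⇒ A's sorted accumulator = B's dedup scan
theorem main_lists_eq (a1 a2 : List String) (h1 : a1 ≠ []) (h2 : a2 ≠ []) :
    PySem.List.sorted (a1.foldl (fun x i => a2.foldl (fun x j => longestcomboStepA x i j) x) []) (fun s => s) false =
    (PySem.List.sorted (a1 ++ a2) (fun s => s) false).foldl
      (fun out c => if out = [] ∨ c ≠ PySem.List.pyGetD out (-1) "" then out ++ [c] else out) [] := by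
  set x := a1.foldl (fun x i => a2.foldl (fun x j => longestcomboStepA x i j) x) [] with hx
  set ys := PySem.List.sorted (a1 ++ a2) (fun s => s) false with hys
  set R := ys.foldl (fun out c => if out = [] ∨ c ≠ PySem.List.pyGetD out (-1) "" then out ++ [c] else out) [] with hR
  obtain ⟨hRpw, hRmem⟩ := dedupB_spec ys [] (PySem.List.sorted_pairwise (a1 ++ a2) (fun s => s)) (by simp) (by simp)
  have hRnodup : R.Nodup := hRpw.imp (fun h => ne_of_lt h)
  have hxnodup : x.Nodup := outerA_nodup a1 a2 [] (by simp)
  have hmemx : ∀ s, s ∈ x ↔ s ∈ a1 ++ a2 := by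
    intro s
    rw [hx, outerA_mem a1 a2 [] h1 h2 s]
    simp
  have hperm : R.Perm x := by
    rw [List.perm_ext_iff_of_nodup hRnodup hxnodup]
    intro s
    rw [hRmem s, hmemx s]
    simp [hys, PySem.List.mem_sorted]
  exact PySem.List.sorted_eq_of_perm_of_pairwise_lt x R (fun s => s) hperm hRpw

-- when both programs see only empty strings (or no strings), both return ""
theorem both_empty_case (a1 a2 : List String) (hemp : a1 = [] ∨ a2 = [])
    (hall : ∀ s ∈ a1 ++ a2, s = "") :
    longestcombo a1 a2 = longestcombo_alt a1 a2 := by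
  have hA : longestcombo a1 a2 = "" := by
    unfold longestcombo
    rw [xA_nil_of_empty a1 a2 hemp]
    decide
  have hB : longestcombo_alt a1 a2 = "" := by
    unfold longestcombo_alt
    obtain ⟨_, hmem⟩ := dedupB_spec (PySem.List.sorted (a1 ++ a2) (fun s => s) false) []
      (PySem.List.sorted_pairwise (a1 ++ a2) (fun s => s)) (by simp) (by simp)
    apply join_all_empty
    intro s hs
    have : s ∈ PySem.List.sorted (a1 ++ a2) (fun s => s) false := by
      rcases (hmem s).mp hs with h | h
      · exact absurd h (List.not_mem_nil)
      · exact h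
    exact hall s (by simpa [PySem.List.mem_sorted] using this)
  rw [hA, hB]

-- ===== VERDICT (by name: the statement is the Claim_ definition above) =====
theorem longestcombo_spec : Claim_unchanged_longestcombo := by
  intro a1 a2 _
  unfold Spec_longestcombo
  intro hnD
  by_cases h1 : a1 = []
  · exact both_empty_case a1 a2 (Or.inl h1) (by
      intro s hs
      by_contra hne
      exact hnD ⟨Or.inl h1, s, hs, hne⟩)
  · by_cases h2 : a2 = []
    · exact both_empty_case a1 a2 (Or.inr h2) (by
        intro s hs
        by_contra hne
        exact hnD ⟨Or.inr h2, s, hs, hne⟩)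
    · exact congrArg (PySem.Str.join "") (main_lists_eq a1 a2 h1 h2)

theorem longestcombo_changed : Claim_changed_longestcombo := by
  unfold Claim_changed_longestcombo
  refine ⟨by decide, by decide, ?_, ?_, by decide⟩
  · show longestcombo ["a"] [] = ""
    decide
  · show longestcombo_alt ["a"] [] = "a"
    decide

theorem longestcombo_tight : Claim_exact_longestcombo := by
  intro a1 a2 _ hD
  obtain ⟨hemp, s, hs, hne⟩ := hD
  have hA : longestcombo a1 a2 = "" := by
    unfold longestcombo
    rw [xA_nil_of_empty a1 a2 hemp]
    decide
  have hB : longestcombo_alt a1 a2 ≠ "" := by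
    unfold longestcombo_alt
    obtain ⟨_, hmem⟩ := dedupB_spec (PySem.List.sorted (a1 ++ a2) (fun s => s) false) []
      (PySem.List.sorted_pairwise (a1 ++ a2) (fun s => s)) (by simp) (by simp)
    apply join_ne_empty _ s _ hne
    rw [hmem s]
    right
    simpa [PySem.List.mem_sorted] using hs
  rw [hA]
  exact fun h => hB h.symm
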